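-- pv_equiv track=rewrite | github.com/rachitrawat/ESKM | modules/utils.py | polynomial_eval
-- ===== SOURCE A (Python) =====
-- def polynomial_eval(coeff_lst, x, p, modulo=True):
--     """ Evaluates polynomial at x using Horner's rule
--     """
--     deg = len(coeff_lst)
--     sum = 0
--
--     for i in range(0, deg):
--         if modulo:
--             sum = (sum * x + coeff_lst[deg - 1 - i]) % p
--         else:
--             sum = (sum * x + coeff_lst[deg - 1 - i])
--
--     return sum
-- ===== SOURCE B (Python) =====
-- def polynomial_eval(coeff_lst, x, p, modulo=True):
--     """Evaluates polynomial at x by forward power accumulation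
--     (running power of x) instead of Horner's rule."""
--     total = 0
--     power = 1
--     for c in coeff_lst:
--         total = total + c * power
--         if modulo:
--             total %= p
--             power = (power * x) % p
--         else:
--             power = power * x
--     return total
-- ===== Notes on version B (the rewrite author's own statement) =====
-- stated objective: alternative
-- what changed: Replaces Horner's rule over the reversed coefficient list (sum = sum*x + c, indexed back-to-front) with a single forward pass that maintains a running power of x (total += c*power; power *= x), reducing both accumulators mod p per step when modulo is set.
import Mathlib
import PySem

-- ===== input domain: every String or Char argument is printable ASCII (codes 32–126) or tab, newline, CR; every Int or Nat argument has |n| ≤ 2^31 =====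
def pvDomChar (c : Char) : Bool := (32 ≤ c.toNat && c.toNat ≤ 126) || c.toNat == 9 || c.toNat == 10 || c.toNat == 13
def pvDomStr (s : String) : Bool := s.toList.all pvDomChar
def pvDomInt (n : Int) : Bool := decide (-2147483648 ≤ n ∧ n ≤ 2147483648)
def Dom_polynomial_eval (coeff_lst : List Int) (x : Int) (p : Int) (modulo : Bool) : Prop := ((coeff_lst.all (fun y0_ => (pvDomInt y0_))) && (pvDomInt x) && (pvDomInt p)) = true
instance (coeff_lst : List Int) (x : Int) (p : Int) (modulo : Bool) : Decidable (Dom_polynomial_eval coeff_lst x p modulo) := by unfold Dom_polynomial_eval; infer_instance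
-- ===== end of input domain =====

-- B evaluates the polynomial by a forward pass with a running power of x instead of
-- Horner's back-to-front rule; same cost, different maintained state (objective: alternative).

-- ===== PORT A =====
-- for i in range(0, deg): sum = (sum * x + coeff_lst[deg - 1 - i]) [% p]
def polynomial_eval (coeff_lst : List Int) (x : Int) (p : Int) (modulo : Bool) : Int :=
  let deg : Int := coeff_lst.length
  (PySem.List.pyRange 0 deg 1).foldl
    (fun sum i =>
      if modulo then PySem.Int.mod (sum * x + PySem.List.pyGetD coeff_lst (deg - 1 - i) 0) p
      else sum * x + PySem.List.pyGetD coeff_lst (deg - 1 - i) 0) 0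

-- ===== PORT B =====
-- for c in coeff_lst: total = total + c * power; if modulo: total %= p; power = (power*x) % p else power = power*x
def polynomial_eval_alt (coeff_lst : List Int) (x : Int) (p : Int) (modulo : Bool) : Int :=
  (coeff_lst.foldl
    (fun (st : Int × Int) c =>
      let total := st.1 + c * st.2
      if modulo then (PySem.Int.mod total p, PySem.Int.mod (st.2 * x) p)
      else (total, st.2 * x)) (0, 1)).1

-- ===== PRECONDITION & SPEC =====
-- Pre_ excludes exactly the inputs where Python raises ZeroDivisionError: modulo with
-- p = 0 and a nonempty coefficient list (both A and B raise there).
def Pre_polynomial_eval (coeff_lst : List Int) (x : Int) (p : Int) (modulo : Bool) : Prop :=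
  modulo = true → coeff_lst ≠ [] → p ≠ 0
instance (coeff_lst : List Int) (x : Int) (p : Int) (modulo : Bool) : Decidable (Pre_polynomial_eval coeff_lst x p modulo) := by unfold Pre_polynomial_eval; infer_instance
def pvWitness_polynomial_eval : List Int × Int × Int × Bool := ([2, 0, 5], 3, 7, true)

def Spec_polynomial_eval (coeff_lst : List Int) (x : Int) (p : Int) (modulo : Bool) (out : Int) : Prop := out = polynomial_eval_alt coeff_lst x p modulo
instance (coeff_lst : List Int) (x : Int) (p : Int) (modulo : Bool) (out : Int) : Decidable (Spec_polynomial_eval coeff_lst x p modulo out) := by unfold Spec_polynomial_eval; infer_instance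

-- ===== CLAIM (what is proved, stated in full; the proofs are below) =====
def Claim_equal_polynomial_eval : Prop := ∀ (coeff_lst : List Int) (x : Int) (p : Int) (modulo : Bool), Dom_polynomial_eval coeff_lst x p modulo → Pre_polynomial_eval coeff_lst x p modulo → Spec_polynomial_eval coeff_lst x p modulo (polynomial_eval coeff_lst x p modulo)

-- ===== LEMMAS AND PROOFS =====

-- the abstract polynomial value Σ cᵢ xⁱ, as a right fold
def pvVal (x : Int) : List Int → Int
  | [] => 0
  | c :: r => c + x * pvVal x r

-- fmod depends only on the emod-class of its first argument
theorem pv_fmod_congr {a b : Int} (p : Int) (h : a % p = b % p) : a.fmod p = b.fmod p := by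
  rw [Int.fmod_eq_emod, Int.fmod_eq_emod, h]
  have : p ∣ a ↔ p ∣ b := by
    rw [Int.dvd_iff_emod_eq_zero, Int.dvd_iff_emod_eq_zero, h]
  by_cases h0 : 0 ≤ p <;> simp [h0, this]

theorem pv_fmod_emod (a p : Int) : (a.fmod p) % p = a % p := by
  rw [Int.fmod_eq_emod]
  split_ifs with h
  · simp
  · simp

-- A's loop over range(0, deg) with reversed indexing is a fold over the reversed list
theorem pvA_eq_reverse_foldl (l : List Int) (g : Int → Int → Int) :
    (PySem.List.pyRange 0 (l.length : Int) 1).foldl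
      (fun s i => g s (PySem.List.pyGetD l ((l.length : Int) - 1 - i) 0)) 0
    = l.reverse.foldl g 0 := by
  have hlen : (l.length : Int) = (l.reverse.length : Int) := by simp
  have hcongr : (PySem.List.pyRange 0 (l.length : Int) 1).foldl
      (fun s i => g s (PySem.List.pyGetD l ((l.length : Int) - 1 - i) 0)) 0
      = (PySem.List.pyRange 0 ((l.reverse.length : Int)) 1).foldl
      (fun s i => g s (PySem.List.pyGetD l.reverse i 0)) 0 := by
    rw [← hlen]
    refine PySem.List.foldl_congr_mem _ _ _ _ ?_
    intro s i hi
    rw [PySem.List.mem_pyRange_one] at hi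
    obtain ⟨k, rfl⟩ : ∃ k : Nat, i = (k : Int) := ⟨i.toNat, (Int.toNat_of_nonneg hi.1).symm⟩
    have hk : k < l.length := by exact_mod_cast hi.2
    have hidx : (l.length : Int) - 1 - (k : Int) = ((l.length - 1 - k : Nat) : Int) := by
      omega
    rw [hidx, PySem.List.pyGetD_natCast, PySem.List.pyGetD_natCast]
    have heq : l.getD (l.length - 1 - k) 0 = l.reverse.getD k 0 := by
      rw [List.getD_eq_getElem?_getD, List.getD_eq_getElem?_getD,
          List.getElem?_reverse hk]
    rw [heq]
  rw [hcongr, PySem.List.foldl_pyRange_zero_pyGetD' l.reverse 0 g 0]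
theorem pv_foldl_reverse_eq_foldr (l : List Int) (g : Int → Int → Int) :
    l.reverse.foldl g 0 = l.foldr (fun c s => g s c) 0 := by
  rw [List.foldl_reverse]

-- Horner without modulo computes the polynomial value
theorem pv_horner_val (x : Int) (l : List Int) :
    l.foldr (fun c s => s * x + c) 0 = pvVal x l := by
  induction l with
  | nil => rfl
  | cons c r ih => simp [pvVal, ih]; ring

-- Horner with per-step fmod computes (value).fmod p on nonempty input
theorem pv_horner_mod (x p : Int) (l : List Int) (h : l ≠ []) :
    l.foldr (fun c s => (s * x + c).fmod p) 0 = (pvVal x l).fmod p := by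
  induction l with
  | nil => exact absurd rfl h
  | cons c r ih =>
    cases r with
    | nil =>
      simp only [List.foldr_cons, List.foldr_nil]
      have harg : (0 : Int) * x + c = pvVal x [c] := by simp only [pvVal]; ring
      rw [harg]
    | cons c' r' =>
      rw [List.foldr_cons, ih (by simp)]
      apply pv_fmod_congr
      have h1 : ((pvVal x (c' :: r')).fmod p * x + c) % p
          = ((pvVal x (c' :: r')) * x + c) % p :=
        (Int.ModEq.mul_right x (pv_fmod_emod (pvVal x (c' :: r')) p)).add_right c
      rw [h1]; congr 1; simp only [pvVal]; ring

-- B's forward loop without modulo: invariant total + power · value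
theorem pv_alt_nomod (x : Int) (l : List Int) :
    ∀ t pw : Int,
      (l.foldl (fun (st : Int × Int) c => (st.1 + c * st.2, st.2 * x)) (t, pw)).1
        = t + pw * pvVal x l := by
  induction l with
  | nil => intro t pw; simp [pvVal]
  | cons c r ih =>
    intro t pw
    simp only [List.foldl_cons]
    rw [ih]
    simp [pvVal]; ring

-- B's forward loop with per-step fmod: same invariant up to fmod, on nonempty input
theorem pv_alt_mod (x p : Int) (l : List Int) (h : l ≠ []) :
    ∀ t pw : Int,
      (l.foldl (fun (st : Int × Int) c => ((st.1 + c * st.2).fmod p, (st.2 * x).fmod p)) (t, pw)).1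
        = (t + pw * pvVal x l).fmod p := by
  induction l with
  | nil => exact absurd rfl h
  | cons c r ih =>
    intro t pw
    cases r with
    | nil =>
      simp only [List.foldl_cons, List.foldl_nil]
      show (t + c * pw).fmod p = (t + pw * pvVal x [c]).fmod p
      have harg : t + c * pw = t + pw * pvVal x [c] := by simp only [pvVal]; ring
      rw [harg]
    | cons c' r' =>
      rw [List.foldl_cons, ih (by simp)]
      apply pv_fmod_congr
      have h1 : ((t + c * pw).fmod p + (pw * x).fmod p * pvVal x (c' :: r')) % p
          = ((t + c * pw) + (pw * x) * pvVal x (c' :: r')) % p :=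
        Int.ModEq.add (pv_fmod_emod (t + c * pw) p)
          (Int.ModEq.mul_right (pvVal x (c' :: r')) (pv_fmod_emod (pw * x) p))
      rw [h1]; congr 1; simp only [pvVal]; ring

-- ===== VERDICT (by name: the statement is the Claim_ definition above) =====
theorem polynomial_eval_spec : Claim_equal_polynomial_eval := by
  intro l x p modulo _ _
  unfold Spec_polynomial_eval polynomial_eval polynomial_eval_alt
  cases modulo with
  | false =>
    simp only [if_neg (by simp : ¬ (false = true))]
    rw [pvA_eq_reverse_foldl l (fun s c => s * x + c),
        pv_foldl_reverse_eq_foldr, pv_horner_val, pv_alt_nomod]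
    ring
  | true =>
    simp only [PySem.Int.mod, if_true]
    cases l with
    | nil => simp
    | cons c r =>
      rw [pvA_eq_reverse_foldl (c :: r) (fun s c => (s * x + c).fmod p),
          pv_foldl_reverse_eq_foldr, pv_horner_mod x p _ (by simp),
          pv_alt_mod x p _ (by simp)]
      congr 1
      ring
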